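-- pv_equiv track=rewrite | github.com/tdw419/pxos | pxvm/utils/layout.py | allocate_rows
-- ===== SOURCE A (Python) =====
-- from typing import Dict, Tuple
--
-- def calculate_matrix_rows(cols: int, rows: int, image_width: int) -> int:
--     """
--     Calculate how many image rows a matrix occupies.
--
--     Args:
--         cols: Matrix columns
--         rows: Matrix rows
--         image_width: Image width in pixels
--
--     Returns:
--         Number of image rows needed (including header row)
--     """
--     total_elements = cols * rows
--     stride = image_width - 1  # Column 0 is header
--
--     # How many rows for data
--     data_rows = (total_elements + stride - 1) // stride  # Ceiling division
--
--     # +1 for header row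
--     return 1 + data_rows
--
-- def allocate_rows(
--     matrices: Dict[str, Tuple[int, int]],
--     width: int = 256,
--     start_row: int = 1,
-- ) -> Dict[str, int]:
--     """
--     Allocate row assignments for matrices.
--
--     Args:
--         matrices: Dict mapping name → (cols, rows)
--         width: Image width
--         start_row: First available row (default 1, after instructions)
--
--     Returns:
--         Dict mapping name → row_start
--     """
--     allocations = {}
--     current_row = start_row
--
--     for name, (cols, rows) in matrices.items():
--         allocations[name] = current_row
--         matrix_rows = calculate_matrix_rows(cols, rows, width)
--         current_row += matrix_rows
--
--     return allocations
-- ===== SOURCE B (Python) =====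
-- from typing import Dict, Tuple
--
-- def allocate_rows(
--     matrices: Dict[str, Tuple[int, int]],
--     width: int = 256,
--     start_row: int = 1,
-- ) -> Dict[str, int]:
--     # Divide and conquer: allocate each half of the matrix list independently;
--     # the right half starts after the left half's total size; merge the two
--     # sub-allocations by dict union.
--     def size(cols, rows):
--         return 1 + (cols * rows + width - 2) // (width - 1)
--
--     def solve(seg, base):
--         if not seg:
--             return {}
--         if len(seg) == 1:
--             name, (cols, rows) = seg[0]
--             return {name: base}
--         mid = len(seg) // 2
--         left, right = seg[:mid], seg[mid:]
--         lres = solve(left, base)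
--         rres = solve(right, base + sum(size(c, r) for _, (c, r) in left))
--         return {**lres, **rres}
--
--     return solve(list(matrices.items()), start_row)
-- ===== Notes on version B (the rewrite author's own statement) =====
-- stated objective: alternative
-- what changed: Replaces A's single loop that threads a mutable allocations dict and a running current_row with a divide-and-conquer recursion: split the matrix list in half, allocate each half independently (the right half's base row is the left half's base plus its total size) and merge the two sub-allocation dicts.
import Mathlib
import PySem

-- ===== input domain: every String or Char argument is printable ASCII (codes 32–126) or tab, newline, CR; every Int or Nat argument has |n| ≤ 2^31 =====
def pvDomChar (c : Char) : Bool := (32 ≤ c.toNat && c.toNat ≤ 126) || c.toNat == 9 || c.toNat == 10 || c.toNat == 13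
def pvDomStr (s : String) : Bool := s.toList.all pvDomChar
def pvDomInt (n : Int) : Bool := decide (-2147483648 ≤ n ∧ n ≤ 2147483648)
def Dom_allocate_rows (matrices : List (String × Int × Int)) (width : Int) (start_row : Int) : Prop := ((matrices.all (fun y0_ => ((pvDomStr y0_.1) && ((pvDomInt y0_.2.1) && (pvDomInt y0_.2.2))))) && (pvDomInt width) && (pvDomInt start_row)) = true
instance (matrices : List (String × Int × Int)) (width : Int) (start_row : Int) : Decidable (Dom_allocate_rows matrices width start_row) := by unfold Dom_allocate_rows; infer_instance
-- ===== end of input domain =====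

-- B replaces A's single loop (mutable dict + running current_row) by divide and conquer:
-- each half of the matrix list is allocated independently (the right half offset by the left
-- half's total size) and the two sub-allocations are merged; alternative algorithm, same result.
-- ===== PORT A =====
def calculate_matrix_rows (cols : Int) (rows : Int) (image_width : Int) : Int :=
  let total_elements := cols * rows
  let stride := image_width - 1
  let data_rows := PySem.Int.floordiv (total_elements + stride - 1) stride
  1 + data_rows

def allocate_rows (matrices : List (String × Int × Int)) (width : Int) (start_row : Int) : List (String × Int) :=
  let st := matrices.foldl
    (fun (acc : PySem.Dict String Int × Int) m =>
      let allocations := acc.1.insert m.1 acc.2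
      let matrix_rows := calculate_matrix_rows m.2.1 m.2.2 width
      (allocations, acc.2 + matrix_rows))
    (PySem.Dict.empty, start_row)
  st.1.items

-- ===== PORT B =====
-- Per-matrix size (Python helper `size`).
def allocate_rows_size (width cols rows : Int) : Int :=
  1 + PySem.Int.floordiv (cols * rows + width - 2) (width - 1)

-- The Python inner divide-and-conquer `solve`; the extra Nat argument is FUEL (always called
-- with fuel ≥ len(seg), so the 0/cons branch is unreachable): it only makes the same halving
-- recursion structural. seg[:mid]/seg[mid:] with 0 ≤ mid ≤ len are exactly List.take/List.drop,
-- and `{**lres, **rres}` is a dict built from lres's entries then updated by rres's entries in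
-- order (exact Python dict-unpacking semantics).
def allocate_rows_solve (width : Int) : Nat → List (String × Int × Int) → Int → PySem.Dict String Int
  | _, [], _ => PySem.Dict.empty
  | _, [(name, _, _)], base => PySem.Dict.empty.insert name base
  | 0, _ :: _ :: _, _ => PySem.Dict.empty
  | Nat.succ f, a :: b :: t, base =>
      let seg := a :: b :: t
      let mid := seg.length / 2
      let left := seg.take mid
      let right := seg.drop mid
      let lres := allocate_rows_solve width f left base
      let rres := allocate_rows_solve width f right
        (base + (left.map (fun m => allocate_rows_size width m.2.1 m.2.2)).sum)
      rres.items.foldl (fun d p => d.insert p.1 p.2)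
        (lres.items.foldl (fun d p => d.insert p.1 p.2) PySem.Dict.empty)

def allocate_rows_alt (matrices : List (String × Int × Int)) (width : Int) (start_row : Int) : List (String × Int) :=
  (allocate_rows_solve width matrices.length matrices start_row).items

-- ===== PRECONDITION & SPEC =====
-- Pre_ excludes exactly the inputs where Python A raises ZeroDivisionError: width = 1 with a nonempty dict.
def Pre_allocate_rows (matrices : List (String × Int × Int)) (width : Int) (start_row : Int) : Prop :=
  matrices = [] ∨ width ≠ 1
instance (matrices : List (String × Int × Int)) (width : Int) (start_row : Int) : Decidable (Pre_allocate_rows matrices width start_row) := by unfold Pre_allocate_rows; infer_instance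
def pvWitness_allocate_rows : (List (String × Int × Int)) × Int × Int := ([("a", 3, 4), ("b", 0, 0)], 256, 1)

def Spec_allocate_rows (matrices : List (String × Int × Int)) (width : Int) (start_row : Int) (out : List (String × Int)) : Prop := out = allocate_rows_alt matrices width start_row
instance (matrices : List (String × Int × Int)) (width : Int) (start_row : Int) (out : List (String × Int)) : Decidable (Spec_allocate_rows matrices width start_row out) := by unfold Spec_allocate_rows; infer_instance

-- ===== CLAIM (what is proved, stated in full; the proofs are below) =====
def Claim_equal_allocate_rows : Prop := ∀ (matrices : List (String × Int × Int)) (width : Int) (start_row : Int), Dom_allocate_rows matrices width start_row → Pre_allocate_rows matrices width start_row → Spec_allocate_rows matrices width start_row (allocate_rows matrices width start_row)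

-- ===== LEMMAS AND PROOFS =====
-- Shorthand (proof-side only): fold a pair list into a dict by insert ("dict update").
def updIns (d : PySem.Dict String Int) (l : List (String × Int)) : PySem.Dict String Int :=
  l.foldl (fun d p => d.insert p.1 p.2) d

-- A's per-entry size equals B's per-entry size (same arithmetic, associated differently).
theorem size_eq (c r w : Int) :
    calculate_matrix_rows c r w = 1 + PySem.Int.floordiv (c * r + w - 2) (w - 1) := by
  show 1 + PySem.Int.floordiv (c * r + (w - 1) - 1) (w - 1) = _
  have h : c * r + (w - 1) - 1 = c * r + w - 2 := by ring
  rw [h]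

-- Overwriting key k (already present) commutes with inserting a different key r.
theorem insert_comm_of_contains (d : PySem.Dict String Int) {k r : String} (v w : Int)
    (hk : d.contains k = true) (hne : r ≠ k) :
    (d.insert r w).insert k v = (d.insert k v).insert r w := by
  apply PySem.Dict.ext
  have hk' : (d.insert r w).contains k = true := by
    simp [PySem.Dict.contains_insert, hk]
  have hr' : (d.insert k v).contains r = d.contains r := by
    simp [PySem.Dict.contains_insert, hne]
  by_cases hr : d.contains r = true
  · rw [PySem.Dict.items_insert_of_contains _ v hk',
        PySem.Dict.items_insert_of_contains _ w hr,
        PySem.Dict.items_insert_of_contains _ w (by rw [hr']; exact hr),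
        PySem.Dict.items_insert_of_contains _ v hk]
    simp only [List.map_map]
    apply List.map_congr_left
    intro p _
    by_cases h1 : p.1 = r <;> by_cases h2 : p.1 = k <;>
      simp_all [Function.comp]
  · have hr0 : d.contains r = false := by simpa using hr
    rw [PySem.Dict.items_insert_of_contains _ v hk',
        PySem.Dict.items_insert_of_not_contains _ w hr0,
        PySem.Dict.items_insert_of_not_contains _ w (by rw [hr']; exact hr0),
        PySem.Dict.items_insert_of_contains _ v hk]
    simp [hne]

-- If base already contains k and no pair of es has key k, the overwrite of k moves through the fold.
theorem updIns_insert_of_contains (es : List (String × Int)) :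
    ∀ (base : PySem.Dict String Int) (k : String) (v : Int),
    base.contains k = true → (∀ p ∈ es, p.1 ≠ k) →
    updIns (base.insert k v) es = (updIns base es).insert k v := by
  induction es with
  | nil => intro base k v _ _; rfl
  | cons q es' ih =>
    intro base k v hk hfresh
    have hq : q.1 ≠ k := hfresh q (by simp)
    show updIns ((base.insert k v).insert q.1 q.2) es' = (updIns (base.insert q.1 q.2) es').insert k v
    rw [← insert_comm_of_contains base v q.2 hk hq]
    exact ih (base.insert q.1 q.2) k v
      (by simp [PySem.Dict.contains_insert, hk]) (fun p hp => hfresh p (by simp [hp]))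

-- Folding the items with the k-entry replaced equals folding the original items then overwriting k.
theorem updIns_map_replace (es : List (String × Int)) :
    ∀ (d : PySem.Dict String Int) (k : String) (v : Int),
    (es.map (·.1)).Nodup → k ∈ es.map (·.1) →
    updIns d (es.map (fun p => if p.1 == k then (k, v) else p)) = (updIns d es).insert k v := by
  induction es with
  | nil => intro _ _ _ _ h; simp at h
  | cons q es' ih =>
    intro d k v hnd hmem
    by_cases hq : q.1 = k
    · have hes' : ∀ p ∈ es', p.1 ≠ k := by
        intro p hp hpk
        have h1 := (List.nodup_cons.mp hnd).1
        have : q.1 ∈ es'.map (·.1) := by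
          rw [hq, ← hpk]; exact List.mem_map_of_mem hp
        exact h1 this
      have hmap : es'.map (fun p => if p.1 == k then (k, v) else p) = es' := by
        have h : ∀ p ∈ es', (if p.1 == k then (k, v) else p) = p := by
          intro p hp; simp [hes' p hp]
        simpa using List.map_congr_left (g := id) h
      simp only [List.map_cons]
      rw [if_pos (by simp [hq])]
      show updIns (d.insert k v) (es'.map _) = (updIns (d.insert q.1 q.2) es').insert k v
      rw [hmap, hq,
        ← updIns_insert_of_contains es' (d.insert k q.2) k v
          (PySem.Dict.contains_insert_self d k q.2) hes',
        PySem.Dict.insert_insert_self]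
    · have hmem' : k ∈ es'.map (·.1) := by
        rcases List.mem_map.mp hmem with ⟨p, hp, hpk⟩
        rcases List.mem_cons.mp hp with h | h
        · exact absurd (h ▸ hpk) hq
        · exact List.mem_map.mpr ⟨p, h, hpk⟩
      simp only [List.map_cons]
      rw [if_neg (by simp [hq])]
      show updIns (d.insert q.1 q.2) (es'.map _) = (updIns (d.insert q.1 q.2) es').insert k v
      exact ih (d.insert q.1 q.2) k v (List.nodup_cons.mp hnd).2 hmem'

-- Updating d with (e.insert k v)'s items = updating d with e's items, then inserting (k, v).
theorem updIns_items_insert (e d : PySem.Dict String Int) (k : String) (v : Int)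
    (hnd : e.keys.Nodup) :
    updIns d (e.insert k v).items = (updIns d e.items).insert k v := by
  by_cases hc : e.contains k = true
  · rw [PySem.Dict.items_insert_of_contains _ v hc]
    exact updIns_map_replace e.items d k v hnd
      ((PySem.Dict.contains_iff_mem_keys e k).mp hc)
  · have hc0 : e.contains k = false := by simpa using hc
    rw [PySem.Dict.items_insert_of_not_contains _ v hc0]
    show (e.items ++ [(k, v)]).foldl _ d = _
    rw [List.foldl_append]
    rfl

-- "Update composes": updating d with (updIns e l)'s items = updating d with e's items, then with l.
theorem updIns_updIns (l : List (String × Int)) :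
    ∀ (e d : PySem.Dict String Int), e.keys.Nodup →
    updIns d (updIns e l).items = updIns (updIns d e.items) l := by
  induction l with
  | nil => intro e d _; rfl
  | cons p l' ih =>
    intro e d hnd
    show updIns d (updIns (e.insert p.1 p.2) l').items = updIns ((updIns d e.items).insert p.1 p.2) l'
    rw [ih (e.insert p.1 p.2) d (PySem.Dict.nodup_keys_insert e p.1 p.2 hnd),
        updIns_items_insert e d p.1 p.2 hnd]

-- Every dict `solve` returns has nodup keys (each branch folds inserts from a nodup start).
theorem solve_nodup_keys (w : Int) : ∀ (fuel : Nat) (seg : List (String × Int × Int)) (b : Int),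
    (allocate_rows_solve w fuel seg b).keys.Nodup := by
  intro fuel seg b
  match fuel, seg with
  | f, [] =>
    simp only [allocate_rows_solve]
    exact PySem.Dict.nodup_keys_empty
  | f, [(n, c, r)] =>
    simp only [allocate_rows_solve]
    exact PySem.Dict.nodup_keys_insert _ n b PySem.Dict.nodup_keys_empty
  | 0, a :: x :: t =>
    simp only [allocate_rows_solve]
    exact PySem.Dict.nodup_keys_empty
  | Nat.succ f, a :: x :: t =>
    simp only [allocate_rows_solve]
    exact PySem.Dict.nodup_keys_foldl_insert_key _
      (fun (p : String × Int) => p.1)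
      (fun (_ : PySem.Dict String Int) (p : String × Int) => p.2) _
      (PySem.Dict.nodup_keys_foldl_insert_key _
        (fun (p : String × Int) => p.1)
        (fun (_ : PySem.Dict String Int) (p : String × Int) => p.2) _
        PySem.Dict.nodup_keys_empty)

-- Rebuilding a nodup-keyed dict from its items by inserts gives the dict back.
theorem updIns_empty_items (e : PySem.Dict String Int) (hnd : e.keys.Nodup) :
    updIns PySem.Dict.empty e.items = e := by
  apply PySem.Dict.ext
  show (e.items.foldl (fun d p => d.insert p.1 p.2) PySem.Dict.empty).items = e.items
  have h := PySem.Dict.items_foldl_insert_fresh (l := e.items)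
    (k := (·.1)) (v := (·.2)) (d := PySem.Dict.empty)
    (by intro a _; exact PySem.Dict.contains_empty a.1) hnd
  rw [h]; simp [PySem.Dict.empty]

-- A's running row after a block equals the start plus the block's total size.
theorem foldA_snd (w : Int) (seg : List (String × Int × Int)) :
    ∀ (d : PySem.Dict String Int) (s : Int),
    (seg.foldl
      (fun (acc : PySem.Dict String Int × Int) m =>
        (acc.1.insert m.1 acc.2, acc.2 + calculate_matrix_rows m.2.1 m.2.2 w))
      (d, s)).2
    = s + (seg.map (fun m => allocate_rows_size w m.2.1 m.2.2)).sum := by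
  induction seg with
  | nil => intro d s; simp
  | cons m rest ih =>
    intro d s
    rw [List.foldl_cons, ih, List.map_cons, List.sum_cons,
        size_eq m.2.1 m.2.2 w]
    show s + (1 + PySem.Int.floordiv _ _) + _ = _
    unfold allocate_rows_size
    ring

-- Main invariant: with enough fuel, updating any dict d with `solve seg b`'s entries equals
-- A's fold over seg from (d, b).
theorem solve_invariant (w : Int) : ∀ (fuel : Nat) (seg : List (String × Int × Int)),
    seg.length ≤ fuel → ∀ (b : Int) (d : PySem.Dict String Int),
    updIns d (allocate_rows_solve w fuel seg b).items
    = (seg.foldl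
        (fun (acc : PySem.Dict String Int × Int) m =>
          (acc.1.insert m.1 acc.2, acc.2 + calculate_matrix_rows m.2.1 m.2.2 w))
        (d, b)).1 := by
  intro fuel
  induction fuel with
  | zero =>
    intro seg hlen b d
    have : seg = [] := List.eq_nil_of_length_eq_zero (Nat.le_zero.mp hlen)
    subst this
    rfl
  | succ f ih =>
    intro seg hlen b d
    match seg with
    | [] => rfl
    | [(nm, c, r)] =>
      show updIns d (PySem.Dict.empty.insert nm b).items = d.insert nm b
      rw [PySem.Dict.items_insert_of_not_contains _ b (PySem.Dict.contains_empty nm)]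
      show updIns d (PySem.Dict.empty.items ++ [(nm, b)]) = d.insert nm b
      rfl
    | a :: x :: t =>
      have hlen' : t.length + 2 ≤ f + 1 := by simpa using hlen
      have hlenl : (List.take ((a :: x :: t).length / 2) (a :: x :: t)).length ≤ f := by
        simp [List.length_take]; omega
      have hlenr : (List.drop ((a :: x :: t).length / 2) (a :: x :: t)).length ≤ f := by
        simp [List.length_drop]; omega
      have hnodl := solve_nodup_keys w f (List.take ((a :: x :: t).length / 2) (a :: x :: t)) b
      -- the merged dict is updIns (updIns empty lres.items) rres.items
      show updIns d (updIns (updIns PySem.Dict.empty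
              (allocate_rows_solve w f (List.take ((a :: x :: t).length / 2) (a :: x :: t)) b).items)
            (allocate_rows_solve w f (List.drop ((a :: x :: t).length / 2) (a :: x :: t))
              (b + ((List.take ((a :: x :: t).length / 2) (a :: x :: t)).map
                (fun m => allocate_rows_size w m.2.1 m.2.2)).sum)).items).items
          = _
      have hnodL' : (updIns PySem.Dict.empty
          (allocate_rows_solve w f (List.take ((a :: x :: t).length / 2) (a :: x :: t)) b).items).keys.Nodup := by
        exact PySem.Dict.nodup_keys_foldl_insert_key
          ((allocate_rows_solve w f (List.take ((a :: x :: t).length / 2) (a :: x :: t)) b).items)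
          (fun (p : String × Int) => p.1)
          (fun (_ : PySem.Dict String Int) (p : String × Int) => p.2)
          PySem.Dict.empty PySem.Dict.nodup_keys_empty
      rw [updIns_updIns _ _ d hnodL', updIns_empty_items _ hnodl]
      rw [ih _ hlenl b d]
      rw [ih _ hlenr _ _]
      conv_rhs => rw [show a :: x :: t
          = List.take ((a :: x :: t).length / 2) (a :: x :: t)
            ++ List.drop ((a :: x :: t).length / 2) (a :: x :: t)
          from (List.take_append_drop _ _).symm]
      rw [List.foldl_append]
      have hpair : ((List.take ((a :: x :: t).length / 2) (a :: x :: t)).foldl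
          (fun (acc : PySem.Dict String Int × Int) m =>
            (acc.1.insert m.1 acc.2, acc.2 + calculate_matrix_rows m.2.1 m.2.2 w))
          (d, b))
        = (((List.take ((a :: x :: t).length / 2) (a :: x :: t)).foldl
            (fun (acc : PySem.Dict String Int × Int) m =>
              (acc.1.insert m.1 acc.2, acc.2 + calculate_matrix_rows m.2.1 m.2.2 w))
            (d, b)).1,
           b + ((List.take ((a :: x :: t).length / 2) (a :: x :: t)).map
             (fun m => allocate_rows_size w m.2.1 m.2.2)).sum) := by
        rw [← foldA_snd w _ d b]
      rw [← hpair]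

theorem allocate_rows_eq (matrices : List (String × Int × Int)) (width : Int) (start_row : Int) :
    allocate_rows matrices width start_row = allocate_rows_alt matrices width start_row := by
  simp only [allocate_rows, allocate_rows_alt]
  rw [← solve_invariant width matrices.length matrices (Nat.le_refl _) start_row PySem.Dict.empty]
  rw [updIns_empty_items _ (solve_nodup_keys width matrices.length matrices start_row)]

-- ===== VERDICT (by name: the statement is the Claim_ definition above) =====
theorem allocate_rows_spec : Claim_equal_allocate_rows := by
  intro matrices width start_row _ _
  exact allocate_rows_eq matrices width start_row
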